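-- pv_equiv track=rewrite | github.com/limkeunhyeok/algorithm-study | keunhak/wemakeprice/prob1.py | solution
-- ===== SOURCE A (Python) =====
-- def solution(n):
--     if n == 0: return 1
--     if n == 1: return 1
--     if n == 2: return 2
--
--     if n % 2 == 1:
--         return (solution(int(n/2) + 1) * solution(int(n/2))) + (solution(int(n/2)) * solution(int(n/2) - 1))
--     else:
--         return (solution(int(n/2)) * solution(int(n/2))) + (solution(int(n/2)-1) * solution(int(n/2)-1))
-- ===== SOURCE B (Python) =====
-- def solution(n):
--     a, b = 1, 1
--     for _ in range(n):
--         a, b = b, a + b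
--     return a
-- ===== Notes on version B (the rewrite author's own statement) =====
-- stated objective: faster
-- what changed: Replaced A's quadruple-branching recursion on n/2 (a recursive fast-doubling identity without memoization, O(n^2) calls) by a single iterative loop that carries the shifted-Fibonacci pair (a,b).
import Mathlib
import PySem

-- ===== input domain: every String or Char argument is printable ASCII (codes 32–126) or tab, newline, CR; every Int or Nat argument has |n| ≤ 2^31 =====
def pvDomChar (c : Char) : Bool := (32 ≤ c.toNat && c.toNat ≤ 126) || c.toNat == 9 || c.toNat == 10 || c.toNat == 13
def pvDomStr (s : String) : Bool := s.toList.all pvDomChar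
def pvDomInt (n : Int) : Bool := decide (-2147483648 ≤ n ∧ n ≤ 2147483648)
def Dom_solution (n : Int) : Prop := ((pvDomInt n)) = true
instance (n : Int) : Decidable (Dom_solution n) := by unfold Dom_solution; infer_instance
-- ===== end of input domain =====

-- B replaces A's quadruple-branching recursion on n/2 by one linear loop over a Fibonacci pair (objective: faster).

-- ===== PORT A =====
-- fuel-guarded transliteration of A's recursion; fuel = n.toNat + 1 suffices on the
-- admitted domain (0 ≤ n), since every recursive call strictly decreases n.
-- int(n/2) is truncating division, ported exactly as Int.tdiv (exact since |n| ≤ 2^31).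
def solutionAux : Nat → Int → Int
  | 0, _ => 0      -- unreachable for 0 ≤ n with fuel > n
  | fuel + 1, n =>
    if n == 0 then 1
    else if n == 1 then 1
    else if n == 2 then 2
    else if PySem.Int.mod n 2 == 1 then
      (solutionAux fuel (Int.tdiv n 2 + 1) * solutionAux fuel (Int.tdiv n 2)) +
        (solutionAux fuel (Int.tdiv n 2) * solutionAux fuel (Int.tdiv n 2 - 1))
    else
      (solutionAux fuel (Int.tdiv n 2) * solutionAux fuel (Int.tdiv n 2)) +
        (solutionAux fuel (Int.tdiv n 2 - 1) * solutionAux fuel (Int.tdiv n 2 - 1))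

def solution (n : Int) : Int := solutionAux (n.toNat + 1) n

-- ===== PORT B =====
-- a, b = 1, 1; for _ in range(n): a, b = b, a + b; return a
def solution_alt (n : Int) : Int :=
  ((PySem.List.pyRange 0 n 1).foldl (fun (p : Int × Int) _ => (p.2, p.1 + p.2)) (1, 1)).1

-- ===== PRECONDITION & SPEC =====
-- Pre_ excludes n < 0, where A recurses on itself forever (RecursionError).
def Pre_solution (n : Int) : Prop := 0 ≤ n
instance (n : Int) : Decidable (Pre_solution n) := by unfold Pre_solution; infer_instance
def pvWitness_solution : Int := 7

def Spec_solution (n : Int) (out : Int) : Prop := out = solution_alt n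
instance (n : Int) (out : Int) : Decidable (Spec_solution n out) := by unfold Spec_solution; infer_instance

-- ===== CLAIM (what is proved, stated in full; the proofs are below) =====
def Claim_equal_solution : Prop := ∀ (n : Int), Dom_solution n → Pre_solution n → Spec_solution n (solution n)

-- ===== LEMMAS AND PROOFS =====

-- B's loop computes the pair (fib (m+1), fib (m+2)).
theorem alt_loop_fib (m : Nat) :
    ((PySem.List.pyRange 0 (m : Int) 1).foldl (fun (p : Int × Int) _ => (p.2, p.1 + p.2)) (1, 1))
      = ((Nat.fib (m + 1) : Int), (Nat.fib (m + 2) : Int)) := by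
  induction m with
  | zero => simp
  | succ k ih =>
    rw [show ((k + 1 : Nat) : Int) = (k : Int) + 1 by push_cast; ring,
        PySem.List.pyRange_one_succ_right (by positivity)]
    rw [List.foldl_append, ih]
    simp only [List.foldl_cons, List.foldl_nil, Prod.mk.injEq]
    refine ⟨by norm_num, ?_⟩
    have h : Nat.fib (k + 1 + 2) = Nat.fib (k + 1) + Nat.fib (k + 2) := by
      rw [Nat.fib_add_two]
    exact_mod_cast h.symm

theorem alt_eq_fib (n : Int) (hn : 0 ≤ n) : solution_alt n = (Nat.fib (n.toNat + 1) : Int) := by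
  obtain ⟨m, rfl⟩ : ∃ m : Nat, n = (m : Int) := ⟨n.toNat, by omega⟩
  unfold solution_alt
  rw [alt_loop_fib]
  simp

theorem aux_eq_fib (fuel : Nat) (n : Int) (hn : 0 ≤ n) (hlt : n < (fuel : Int)) :
    solutionAux fuel n = (Nat.fib (n.toNat + 1) : Int) := by
  induction fuel generalizing n with
  | zero => omega
  | succ f ih =>
    rw [solutionAux]
    by_cases h0 : n = 0
    · simp [h0]
    by_cases h1 : n = 1
    · simp [h1]
    by_cases h2 : n = 2
    · simp [h2]; rfl
    have h3 : 3 ≤ n := by omega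
    have hk : Int.tdiv n 2 = (n.toNat / 2 : Nat) := by
      have h := Int.tdiv_eq_ediv (a := n) (b := 2)
      rw [if_pos (Or.inl hn)] at h
      omega
    have hK1 : (1 : Int) ≤ (n.toNat / 2 : Nat) := by omega
    have hrec : ∀ m : Int, 0 ≤ m → m ≤ n - 1 → solutionAux f m = (Nat.fib (m.toNat + 1) : Int) := by
      intro m hm hmn
      exact ih m hm (by omega)
    have hkn : Int.tdiv n 2 + 1 ≤ n - 1 := by omega
    rw [if_neg (by simp [h0]), if_neg (by simp [h1]), if_neg (by simp [h2])]
    set K : Nat := n.toNat / 2 with hKdef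
    have e1 : solutionAux f (Int.tdiv n 2 + 1) = (Nat.fib (K + 2) : Int) := by
      rw [hrec _ (by omega) (by omega)]
      congr 2
      omega
    have e2 : solutionAux f (Int.tdiv n 2) = (Nat.fib (K + 1) : Int) := by
      rw [hrec _ (by omega) (by omega)]
      congr 2
      omega
    have e3 : solutionAux f (Int.tdiv n 2 - 1) = (Nat.fib K : Int) := by
      rw [hrec _ (by omega) (by omega)]
      congr 2
      omega
    by_cases hodd : n % 2 = 1
    · rw [if_pos (by simp [hodd]), e1, e2, e3]
      have hN : n.toNat = 2 * K + 1 := by omega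
      have h := Nat.fib_add K (K + 1)
      rw [show K + (K + 1) + 1 = 2 * K + 1 + 1 by ring] at h
      rw [hN, h]
      push_cast; ring
    · rw [if_neg (by simp [hodd]), e2, e3]
      have hN : n.toNat = 2 * K := by omega
      have h := Nat.fib_add K K
      rw [show K + K + 1 = 2 * K + 1 by ring] at h
      rw [hN, h]
      push_cast; ring

-- ===== VERDICT (by name: the statement is the Claim_ definition above) =====
theorem solution_spec : Claim_equal_solution := by
  intro n _ hpre
  unfold Spec_solution solution
  rw [aux_eq_fib _ _ hpre (by omega), alt_eq_fib _ hpre]
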